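-- pv_equiv track=rewrite | github.com/tixolan/AdventOfCode | 2025/day3/part1.py | obtain_largest_joltage
-- ===== SOURCE A (Python) =====
-- def obtain_largest_joltage(battery_bank: str) -> int:
--     largest_left = "0"
--     index = 0
--     for i, battery in enumerate(battery_bank[:-1]):
--         if battery > largest_left:
--             index = i
--             largest_left = battery
--
--     largest_right = "0"
--     for battery in battery_bank[index+1:]:
--         if battery > largest_right:
--             largest_right = battery
--
--     return int(largest_left + largest_right)
-- ===== SOURCE B (Python) =====
-- def obtain_largest_joltage(battery_bank: str) -> int:
--     best = 0
--     rest = list(battery_bank)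
--     while rest:
--         first = rest.pop(0)
--         for second in rest:
--             best = max(best, int(first + second))
--     return best
-- ===== Notes on version B (the rewrite author's own statement) =====
-- stated objective: alternative
-- what changed: Replaces A's two sequential greedy max-scans (leftmost max digit, then max digit after it) by a brute-force maximum of int(first+second) over all ordered pairs, starting from 0 so strings shorter than 2 give 0 like A.
-- outside the precondition, e.g. on obtain_largest_joltage('!9'): A returns 9, B raises ValueError; on obtain_largest_joltage('9 '): A returns 90, B returns 9; on obtain_largest_joltage(' 9'): A returns 9, B returns 9
import Mathlib
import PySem

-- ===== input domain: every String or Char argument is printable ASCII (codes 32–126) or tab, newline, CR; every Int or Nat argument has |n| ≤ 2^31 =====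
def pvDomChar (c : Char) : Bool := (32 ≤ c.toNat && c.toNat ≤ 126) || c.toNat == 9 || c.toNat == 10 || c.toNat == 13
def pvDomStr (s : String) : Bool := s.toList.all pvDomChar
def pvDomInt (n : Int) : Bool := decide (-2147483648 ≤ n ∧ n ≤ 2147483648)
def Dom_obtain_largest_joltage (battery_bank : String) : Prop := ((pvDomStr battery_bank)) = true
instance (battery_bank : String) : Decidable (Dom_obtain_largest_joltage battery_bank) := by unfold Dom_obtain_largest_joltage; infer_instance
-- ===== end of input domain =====

-- B is a brute-force maximum over all ordered digit pairs instead of A's two greedy max-scans;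
-- objective: alternative (same result, structurally different; not faster).

-- ===== PORT A =====
-- loop body of A's first scan: state (largest_left, index), element (i, battery)
def pvUpdA (st : Char × Int) (ib : Int × Char) : Char × Int :=
  if st.1 < ib.2 then (ib.2, ib.1) else st
-- loop body of A's second scan
def pvMaxc (lr b : Char) : Char :=
  if lr < b then b else lr

def obtain_largest_joltage (battery_bank : String) : Int :=
  let s := battery_bank.toList
  let st := (PySem.List.enumerate (PySem.List.slice s none (some (-1)))).foldl pvUpdA ('0', 0)
  let largest_right := (PySem.List.slice s (some (st.2 + 1)) none).foldl pvMaxc '0'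
  -- int(largest_left + largest_right); ValueError (none) is outside Pre_, defaulted to 0
  (PySem.Int.ofChars? [st.1, largest_right]).getD 0

-- ===== PORT B =====
-- int(first + second); ValueError (none) is outside Pre_, defaulted to 0
def pvVal (c d : Char) : Int := (PySem.Int.ofChars? [c, d]).getD 0

def pvAltGo (rest : List Char) (best : Int) : Int :=
  match rest with
  | [] => best
  | first :: rest' =>
      pvAltGo rest' (rest'.foldl (fun b second => max b (pvVal first second)) best)

def obtain_largest_joltage_alt (battery_bank : String) : Int :=
  pvAltGo battery_bank.toList 0

-- ===== PRECONDITION & SPEC =====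
-- Pre_ excludes strings of length >= 2 containing a non-digit character: there A compares characters
-- against the sentinel and may still return a value, while B raises ValueError on a non-digit pair,
-- e.g. 9 for '!9' where B raises, or 90 for '9 ' where B returns 9; B can also agree with A through
-- whitespace/sign stripping, e.g. both return 9 on ' 9', but such parsing is not claimed.
def Pre_obtain_largest_joltage (battery_bank : String) : Prop :=
  (battery_bank.toList.all (fun c => 48 ≤ c.toNat && c.toNat ≤ 57) || battery_bank.toList.length ≤ 1) = true
instance (battery_bank : String) : Decidable (Pre_obtain_largest_joltage battery_bank) := by
  unfold Pre_obtain_largest_joltage; infer_instance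

def pvWitness_obtain_largest_joltage : String := "34892"

def Spec_obtain_largest_joltage (battery_bank : String) (out : Int) : Prop := out = obtain_largest_joltage_alt battery_bank
instance (battery_bank : String) (out : Int) : Decidable (Spec_obtain_largest_joltage battery_bank out) := by unfold Spec_obtain_largest_joltage; infer_instance

-- ===== CLAIM (what is proved, stated in full; the proofs are below) =====
def Claim_equal_obtain_largest_joltage : Prop := ∀ (battery_bank : String), Dom_obtain_largest_joltage battery_bank → Pre_obtain_largest_joltage battery_bank → Spec_obtain_largest_joltage battery_bank (obtain_largest_joltage battery_bank)

-- ===== LEMMAS AND PROOFS =====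

-- digit-character bookkeeping -------------------------------------------------
theorem char_le_iff (c d : Char) : (c ≤ d) ↔ c.toNat ≤ d.toNat := Iff.rfl
theorem char_lt_iff (c d : Char) : (c < d) ↔ c.toNat < d.toNat := Iff.rfl
theorem char_eq_iff_toNat (c d : Char) : c = d ↔ c.toNat = d.toNat :=
  ⟨fun h => h ▸ rfl, fun h => Char.ext (UInt32.toNat_inj.mp h)⟩

def pvIsDigit (c : Char) : Prop := '0' ≤ c ∧ c ≤ '9'

theorem pvIsDigit_iff (c : Char) : pvIsDigit c ↔ 48 ≤ c.toNat ∧ c.toNat ≤ 57 :=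
  ⟨fun ⟨h1, h2⟩ => ⟨(char_le_iff _ _).mp h1, (char_le_iff _ _).mp h2⟩,
   fun ⟨h1, h2⟩ => ⟨(char_le_iff '0' c).mpr h1, (char_le_iff c '9').mpr h2⟩⟩

theorem digit_toNat {c : Char} (h : pvIsDigit c) : 48 ≤ c.toNat ∧ c.toNat ≤ 57 := by
  obtain ⟨h1, h2⟩ := h
  rw [char_le_iff] at h1 h2
  exact ⟨h1, h2⟩

theorem mem_digits {c : Char} (h : pvIsDigit c) :
    c ∈ ['0','1','2','3','4','5','6','7','8','9'] := by
  obtain ⟨h1, h2⟩ := digit_toNat h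
  simp only [List.mem_cons, List.not_mem_nil, or_false, char_eq_iff_toNat]
  have e0 : ('0':Char).toNat = 48 := rfl
  have e1 : ('1':Char).toNat = 49 := rfl
  have e2 : ('2':Char).toNat = 50 := rfl
  have e3 : ('3':Char).toNat = 51 := rfl
  have e4 : ('4':Char).toNat = 52 := rfl
  have e5 : ('5':Char).toNat = 53 := rfl
  have e6 : ('6':Char).toNat = 54 := rfl
  have e7 : ('7':Char).toNat = 55 := rfl
  have e8 : ('8':Char).toNat = 56 := rfl
  have e9 : ('9':Char).toNat = 57 := rfl
  rw [e0,e1,e2,e3,e4,e5,e6,e7,e8,e9]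
  omega

-- the digit value pv of a two-digit string
def pvPair (c d : Char) : Int := 10*((c.toNat:Int) - 48) + ((d.toNat:Int) - 48)

theorem pvVal_digit {c d : Char} (hc : pvIsDigit c) (hd : pvIsDigit d) :
    pvVal c d = pvPair c d := by
  have : PySem.Int.ofChars? [c,d] = some (pvPair c d) := by
    have hc' := mem_digits hc
    have hd' := mem_digits hd
    unfold pvPair
    fin_cases hc' <;> fin_cases hd' <;> decide
  simp [pvVal, this]

-- generic foldl-max lemmas ----------------------------------------------------
theorem le_foldl_max_init {α : Type} [LinearOrder α] (l : List α) (b : α) :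
    b ≤ l.foldl max b := by
  induction l generalizing b with
  | nil => exact le_refl _
  | cons a t ih => exact le_trans (le_max_left b a) (ih (max b a))

theorem le_foldl_max_mem {α : Type} [LinearOrder α] {l : List α} {x : α} (b : α)
    (hx : x ∈ l) : x ≤ l.foldl max b := by
  induction l generalizing b with
  | nil => cases hx
  | cons a t ih =>
      rcases List.mem_cons.mp hx with rfl | hx'
      · exact le_trans (le_max_right b x) (le_foldl_max_init t _)
      · exact ih _ hx'

theorem foldl_max_le {α : Type} [LinearOrder α] {l : List α} {M : α} (b : α)
    (hb : b ≤ M) (h : ∀ x ∈ l, x ≤ M) : l.foldl max b ≤ M := by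
  induction l generalizing b with
  | nil => exact hb
  | cons a t ih =>
      exact ih _ (max_le hb (h a (List.mem_cons_self))) (fun x hx => h x (List.mem_cons_of_mem _ hx))

theorem foldl_max_mem_cons {α : Type} [LinearOrder α] (l : List α) (b : α) :
    l.foldl max b ∈ b :: l := by
  induction l generalizing b with
  | nil => simp
  | cons a t ih =>
      simp only [List.foldl_cons]
      rcases List.mem_cons.mp (ih (max b a)) with h | h
      · rcases max_choice b a with h' | h' <;> rw [h, h'] <;> simp
      · exact List.mem_cons_of_mem _ (List.mem_cons_of_mem _ h)

theorem foldl_max_eq {α : Type} [LinearOrder α] {l : List α} {M : α} (b : α)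
    (hb : b ≤ M) (hM : M ∈ l) (h : ∀ x ∈ l, x ≤ M) : l.foldl max b = M :=
  le_antisymm (foldl_max_le b hb h) (le_foldl_max_mem b hM)

theorem foldl_pvMaxc_eq_max (l : List Char) (b : Char) :
    l.foldl pvMaxc b = l.foldl max b := by
  have : pvMaxc = fun (a b : Char) => max a b := by
    funext a b
    unfold pvMaxc
    rcases lt_or_ge a b with h | h
    · simp [h, max_eq_right (le_of_lt h)]
    · simp [not_lt.mpr h, max_eq_left h]
  rw [this]

-- A's first scan: invariant of the enumerate fold ----------------------------
theorem foldA_inv (p : List Char) : ∀ (l0 : Char) (i0 j0 : Int),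
    l0 ≤ ((PySem.List.enumerate p i0).foldl pvUpdA (l0, j0)).1 ∧
    (∀ c ∈ p, c ≤ ((PySem.List.enumerate p i0).foldl pvUpdA (l0, j0)).1) ∧
    ((((PySem.List.enumerate p i0).foldl pvUpdA (l0, j0)).1 = l0 ∧
      ((PySem.List.enumerate p i0).foldl pvUpdA (l0, j0)).2 = j0) ∨
     (∃ u t, p = u ++ ((PySem.List.enumerate p i0).foldl pvUpdA (l0, j0)).1 :: t ∧
        ((PySem.List.enumerate p i0).foldl pvUpdA (l0, j0)).2 = i0 + u.length ∧
        (∀ c ∈ u, c < ((PySem.List.enumerate p i0).foldl pvUpdA (l0, j0)).1) ∧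
        l0 < ((PySem.List.enumerate p i0).foldl pvUpdA (l0, j0)).1 ∧
        (∀ c ∈ t, c ≤ ((PySem.List.enumerate p i0).foldl pvUpdA (l0, j0)).1))) := by
  induction p with
  | nil => intro l0 i0 j0; simp [PySem.List.enumerate_nil]
  | cons a p ih =>
      intro l0 i0 j0
      rw [PySem.List.enumerate_cons]
      simp only [List.foldl_cons]
      by_cases hla : l0 < a
      · have hupd : pvUpdA (l0, j0) (i0, a) = (a, i0) := by simp [pvUpdA, hla]
        rw [hupd]
        obtain ⟨h1, h2, h3⟩ := ih a (i0 + 1) i0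
        refine ⟨le_trans (le_of_lt hla) h1, ?_, ?_⟩
        · intro c hc
          rcases List.mem_cons.mp hc with rfl | hc'
          · exact h1
          · exact h2 c hc'
        · rcases h3 with ⟨hL, hJ⟩ | ⟨u, t, hp, hJ, hu, hl0, ht⟩
          · refine Or.inr ⟨[], p, by rw [List.nil_append, hL], by simpa using hJ, by simp, ?_, h2⟩
            rw [hL]; exact hla
          · refine Or.inr ⟨a :: u, t, by rw [List.cons_append]; exact congrArg _ hp,
              by rw [hJ]; simp only [List.length_cons]; push_cast; ring, ?_, lt_of_lt_of_le hla h1, ht⟩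
            intro c hc
            rcases List.mem_cons.mp hc with rfl | hc'
            · exact hl0
            · exact hu c hc'
      · have hupd : pvUpdA (l0, j0) (i0, a) = (l0, j0) := by simp [pvUpdA, hla]
        rw [hupd]
        obtain ⟨h1, h2, h3⟩ := ih l0 (i0 + 1) j0
        refine ⟨h1, ?_, ?_⟩
        · intro c hc
          rcases List.mem_cons.mp hc with rfl | hc'
          · exact le_trans (not_lt.mp hla) h1
          · exact h2 c hc'
        · rcases h3 with ⟨hL, hJ⟩ | ⟨u, t, hp, hJ, hu, hl0, ht⟩
          · exact Or.inl ⟨hL, hJ⟩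
          · refine Or.inr ⟨a :: u, t, by rw [List.cons_append]; exact congrArg _ hp,
              by rw [hJ]; simp only [List.length_cons]; push_cast; ring, ?_, hl0, ht⟩
            intro c hc
            rcases List.mem_cons.mp hc with rfl | hc'
            · exact lt_of_le_of_lt (not_lt.mp hla) hl0
            · exact hu c hc'

-- B as a fold over the list of all pair values --------------------------------
def pvPairs : List Char → List Int
  | [] => []
  | c :: t => t.map (pvVal c) ++ pvPairs t

theorem pvAltGo_eq (s : List Char) : ∀ b : Int, pvAltGo s b = (pvPairs s).foldl max b := by
  induction s with
  | nil => intro b; simp [pvAltGo, pvPairs]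
  | cons c t ih =>
      intro b
      show pvAltGo t (t.foldl (fun b second => max b (pvVal c second)) b) = _
      rw [ih, pvPairs, List.foldl_append]
      congr 1
      rw [List.foldl_map]

theorem mem_pvPairs_of (u : List Char) (c : Char) (w : List Char) {d : Char} (hd : d ∈ w) :
    pvVal c d ∈ pvPairs (u ++ c :: w) := by
  induction u with
  | nil => exact List.mem_append_left _ (List.mem_map_of_mem hd)
  | cons a u ih => exact List.mem_append_right _ ih

theorem pvPairs_mem_imp {s : List Char} {x : Int} (hx : x ∈ pvPairs s) :
    ∃ c l, (c :: l) <:+ s ∧ ∃ d ∈ l, x = pvVal c d := by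
  induction s with
  | nil => cases hx
  | cons a t ih =>
      rcases List.mem_append.mp hx with h | h
      · obtain ⟨d, hd, hval⟩ := List.mem_map.mp h
        exact ⟨a, t, List.suffix_refl _, d, hd, hval.symm⟩
      · obtain ⟨c, l, hsuf, hrest⟩ := ih h
        exact ⟨c, l, hsuf.trans (List.suffix_cons a t), hrest⟩

-- positional split of an occurrence against a decomposition -------------------
theorem split_cases : ∀ (q u : List Char) (c L : Char) (l w : List Char),
    q ++ c :: l = u ++ L :: w →
    c ∈ u ∨ (q = u ∧ c = L ∧ l = w) ∨ (c :: l) <:+ w := by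
  intro q
  induction q with
  | nil =>
      intro u c L l w h
      cases u with
      | nil => simp_all
      | cons a u' =>
          simp only [List.nil_append, List.cons_append, List.cons.injEq] at h
          exact Or.inl (h.1 ▸ List.mem_cons_self)
  | cons b q' ih =>
      intro u c L l w h
      cases u with
      | nil =>
          simp only [List.cons_append, List.nil_append, List.cons.injEq] at h
          exact Or.inr (Or.inr ⟨q', h.2⟩)
      | cons a u' =>
          simp only [List.cons_append, List.cons.injEq] at h
          rcases ih u' c L l w h.2 with h1 | ⟨h1, h2, h3⟩ | h1
          · exact Or.inl (List.mem_cons_of_mem _ h1)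
          · exact Or.inr (Or.inl ⟨by rw [h.1, h1], h2, h3⟩)
          · exact Or.inr (Or.inr h1)

theorem suffix_concat_mem {c z : Char} {l x : List Char}
    (h : (c :: l) <:+ (x ++ [z])) (hl : l ≠ []) : c ∈ x := by
  obtain ⟨pre, hpre⟩ := h
  have hlen := congrArg List.length hpre
  simp only [List.length_append, List.length_cons, List.length_nil] at hlen
  have hll : 1 ≤ l.length := List.length_pos_iff.mpr hl
  have hlt : pre.length < x.length := by omega
  have h1 : (x ++ [z])[pre.length]? = some c := by
    rw [← hpre, List.getElem?_append_right (Nat.le_refl _)]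
    simp
  rw [List.getElem?_append_left hlt] at h1
  exact List.mem_of_getElem? h1

-- the main greedy ↔ brute-force argument --------------------------------------
theorem main_eq (s : List Char) (hdig : ∀ c ∈ s, pvIsDigit c) (hlen : 2 ≤ s.length) :
    obtain_largest_joltage (String.ofList s) = obtain_largest_joltage_alt (String.ofList s) := by
  rcases List.eq_nil_or_concat s with rfl | ⟨p, z, rfl⟩
  · simp at hlen
  have hpne : p ≠ [] := by intro h; subst h; simp at hlen
  obtain ⟨a, p', rfl⟩ := List.exists_cons_of_ne_nil hpne
  simp only [List.concat_eq_append] at hdig ⊢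
  clear hpne hlen
  have hdl : ((a :: p') ++ [z]).dropLast = a :: p' := List.dropLast_concat
  obtain ⟨h1, h2, h3⟩ := foldA_inv (a :: p') '0' 0 0
  set L := ((PySem.List.enumerate (a :: p') 0).foldl pvUpdA ('0', 0)).1 with hLdef
  set J := ((PySem.List.enumerate (a :: p') 0).foldl pvUpdA ('0', 0)).2 with hJdef
  -- unified decomposition of the list around the selected left digit
  have hw : ∃ u t, (a :: p') ++ [z] = u ++ (L :: (t ++ [z])) ∧
      (∀ c ∈ u, c < L) ∧ (∀ c ∈ t, c ≤ L) ∧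
      PySem.List.slice ((a :: p') ++ [z]) (some (J + 1)) none = t ++ [z] := by
    rcases h3 with ⟨hL, hJ⟩ | ⟨u, t, hp, hJ, hu, hl0, ht⟩
    · -- no strict improvement: the head a already equals the selected digit
      have hha : a = L := by
        apply le_antisymm (h2 a List.mem_cons_self)
        rw [hL]
        exact (hdig a (by simp)).1
      refine ⟨[], p', ?_, by simp, ?_, ?_⟩
      · rw [List.nil_append, ← hha]; simp
      · intro c hc
        exact h2 c (List.mem_cons_of_mem _ hc)
      · rw [hJ]
        norm_num
        rw [PySem.List.slice_from_one]
        simp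
    · refine ⟨u, t, ?_, hu, ht, ?_⟩
      · rw [hp]; simp
      · have hj1 : J + 1 = ((u.length + 1 : Nat) : Int) := by
          rw [hJ]; push_cast; ring
        rw [hj1, PySem.List.slice_from_natCast]
        rw [show (a :: p') ++ [z] = (u ++ [L]) ++ (t ++ [z]) from by rw [hp]; simp]
        rw [List.drop_left' (by simp)]
  obtain ⟨u, t, hseq, hu, ht, hslice⟩ := hw
  unfold obtain_largest_joltage obtain_largest_joltage_alt
  simp only [String.toList_ofList]
  rw [PySem.List.slice_to_neg_one, hdl, ← hLdef, ← hJdef, hslice, foldl_pvMaxc_eq_max, pvAltGo_eq]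
  -- facts about the right digit R
  have hzmem : z ∈ t ++ [z] := by simp
  have hwsub : ∀ c ∈ t ++ [z], c ∈ (a :: p') ++ [z] := fun c hc => by
    rw [hseq]; exact List.mem_append_right _ (List.mem_cons_of_mem _ hc)
  have hR0 : '0' ≤ (t ++ [z]).foldl max '0' := le_foldl_max_init _ _
  have hRge : ∀ d ∈ t ++ [z], d ≤ (t ++ [z]).foldl max '0' :=
    fun d hd => le_foldl_max_mem _ hd
  have hRin : (t ++ [z]).foldl max '0' ∈ t ++ [z] := by
    rcases List.mem_cons.mp (foldl_max_mem_cons (t ++ [z]) '0') with h | h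
    · have hz0 : z = (t ++ [z]).foldl max '0' := by
        apply le_antisymm (hRge _ hzmem)
        rw [h]
        exact (hdig _ (hwsub _ hzmem)).1
      rw [← hz0]; exact hzmem
    · exact h
  have hdigL : pvIsDigit L :=
    hdig _ (by rw [hseq]; exact List.mem_append_right _ List.mem_cons_self)
  have hdigR : pvIsDigit ((t ++ [z]).foldl max '0') := hdig _ (hwsub _ hRin)
  -- A's value is the pair value of (L, R)
  have hAval : (PySem.Int.ofChars? [L, (t ++ [z]).foldl max '0']).getD 0 =
      pvPair L ((t ++ [z]).foldl max '0') := by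
    have h := pvVal_digit hdigL hdigR
    unfold pvVal at h
    exact h
  rw [hAval]
  -- B's fold over all pair values equals the same value
  refine (foldl_max_eq 0 ?_ ?_ ?_).symm
  · obtain ⟨hL1, hL2⟩ := digit_toNat hdigL
    obtain ⟨hR1, hR2⟩ := digit_toNat hdigR
    unfold pvPair
    omega
  · rw [hseq]
    have h := mem_pvPairs_of u L (t ++ [z]) hRin
    rw [pvVal_digit hdigL hdigR] at h
    exact h
  · intro x hx
    obtain ⟨c, l, hsuf, d, hd, rfl⟩ := pvPairs_mem_imp hx
    obtain ⟨q, hq⟩ := hsuf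
    have hcs : c ∈ (a :: p') ++ [z] := by rw [← hq]; simp
    have hds : d ∈ (a :: p') ++ [z] := by rw [← hq]; simp [List.mem_append, hd]
    have hdc := hdig c hcs
    have hdd := hdig d hds
    rw [pvVal_digit hdc hdd]
    obtain ⟨hc1, hc2⟩ := digit_toNat hdc
    obtain ⟨hd1, hd2⟩ := digit_toNat hdd
    obtain ⟨hL1, hL2⟩ := digit_toNat hdigL
    obtain ⟨hR1, hR2⟩ := digit_toNat hdigR
    rw [hseq] at hq
    rcases split_cases q u c L l (t ++ [z]) hq with hcu | ⟨_, hcL, hlw⟩ | hsuf2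
    · have hlt := (char_lt_iff _ _).mp (hu c hcu)
      unfold pvPair
      omega
    · subst hcL
      have hle := (char_le_iff _ _).mp (hRge d (hlw ▸ hd))
      unfold pvPair
      omega
    · have hlne : l ≠ [] := List.ne_nil_of_mem hd
      have hct : c ∈ t := suffix_concat_mem hsuf2 hlne
      have hcleL := (char_le_iff _ _).mp (ht c hct)
      obtain ⟨pre, hpre⟩ := hsuf2
      have hdw : d ∈ t ++ [z] := by
        rw [← hpre]
        exact List.mem_append_right _ (List.mem_cons_of_mem _ hd)
      have hle := (char_le_iff _ _).mp (hRge d hdw)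
      unfold pvPair
      omega

-- small cases ------------------------------------------------------------------
theorem small_eq (s : List Char) (hlen : s.length ≤ 1) :
    obtain_largest_joltage (String.ofList s) = obtain_largest_joltage_alt (String.ofList s) := by
  match s, hlen with
  | [], _ =>
    simp [obtain_largest_joltage, obtain_largest_joltage_alt, pvAltGo,
      PySem.List.slice_to_neg_one, PySem.List.enumerate_nil, PySem.List.slice_from_one]
    decide
  | [a], _ =>
    simp [obtain_largest_joltage, obtain_largest_joltage_alt, pvAltGo,
      PySem.List.slice_to_neg_one, PySem.List.enumerate_nil, PySem.List.slice_from_one]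
    decide

-- ===== VERDICT (by name: the statement is the Claim_ definition above) =====
theorem obtain_largest_joltage_spec : Claim_equal_obtain_largest_joltage := by
  intro b _ hpre
  unfold Spec_obtain_largest_joltage
  unfold Pre_obtain_largest_joltage at hpre
  simp only [Bool.or_eq_true, List.all_eq_true, Bool.and_eq_true, decide_eq_true_eq] at hpre
  have hb : b = String.ofList b.toList := String.ofList_toList.symm
  rcases hpre with hdig | hlen
  · by_cases h2 : 2 ≤ b.toList.length
    · rw [hb]; exact main_eq _ (fun c hc => (pvIsDigit_iff c).mpr (hdig c hc)) h2
    · rw [hb]; exact small_eq _ (by omega)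
  · rw [hb]; exact small_eq _ hlen
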